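-- pv_equiv track=rewrite | github.com/mohfarag/event_classifier | src/utils.py | shuffleURLsFromDomainsQueues
-- ===== SOURCE A (Python) =====
-- def shuffleURLsFromDomainsQueues(domainQueues):
-- 	shuffledURLs = []
-- 	while(True):
-- 		empty = True
-- 		for d in domainQueues:
-- 			if domainQueues[d]:
-- 				shuffledURLs.append(domainQueues[d].pop())
-- 				empty = False
-- 		if empty:
-- 			break
-- 	return shuffledURLs
-- ===== SOURCE B (Python) =====
-- def shuffleURLsFromDomainsQueues(domainQueues):
--     # Distribute each queue's URLs (last-to-first) into per-round buckets in one
--     # queue-major pass, then concatenate the buckets; no per-round rescan, no popping.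
--     rounds = []
--     for q in domainQueues.values():
--         for k, url in enumerate(reversed(q)):
--             if k == len(rounds):
--                 rounds.append([])
--             rounds[k].append(url)
--     shuffledURLs = []
--     for r in rounds:
--         shuffledURLs.extend(r)
--     return shuffledURLs
-- ===== Notes on version B (the rewrite author's own statement) =====
-- stated objective: alternative
-- what changed: B makes one queue-major pass, distributing each queue's URLs (last-to-first) into per-round buckets and concatenating the buckets, instead of A's round-major loop that rescans every domain and pops one URL per nonempty queue each round.
import Mathlib
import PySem

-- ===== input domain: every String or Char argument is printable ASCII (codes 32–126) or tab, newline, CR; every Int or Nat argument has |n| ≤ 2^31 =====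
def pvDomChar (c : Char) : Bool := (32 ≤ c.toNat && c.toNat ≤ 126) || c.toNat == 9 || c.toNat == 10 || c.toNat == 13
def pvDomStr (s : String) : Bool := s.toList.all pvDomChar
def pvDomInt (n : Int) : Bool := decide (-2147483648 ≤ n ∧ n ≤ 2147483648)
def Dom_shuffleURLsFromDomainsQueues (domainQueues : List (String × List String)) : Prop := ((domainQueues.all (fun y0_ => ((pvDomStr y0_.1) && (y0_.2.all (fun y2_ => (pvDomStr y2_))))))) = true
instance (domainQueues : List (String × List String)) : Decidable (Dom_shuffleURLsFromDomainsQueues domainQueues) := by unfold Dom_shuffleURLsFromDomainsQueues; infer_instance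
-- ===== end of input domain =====

-- B distributes each queue's URLs (last-to-first) into per-round buckets in one queue-major pass
-- and concatenates the buckets, instead of A's round-major rescans that pop queues; A drains the
-- caller's queue lists in place and B does not (the equivalence proved is about the return value).


-- ===== PORT A =====
-- one pass of A's `for d in domainQueues` loop: appends the popped last element of every
-- nonempty queue (in dict order), replaces the queue by its remainder, and reports `empty`
def pvRoundA : List (String × List String) → List String × List (String × List String) × Bool
  | [] => ([], [], true)
  | (d, q) :: rest =>
    let r := pvRoundA rest
    match q.getLast? with
    | none => (r.1, (d, q) :: r.2.1, r.2.2)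
    | some x => (x :: r.1, (d, q.dropLast) :: r.2.1, false)

-- A's `while True` loop; the fuel (total number of URLs + 1) is a totality guard only:
-- every round before the final empty-detecting one pops at least one URL
def pvLoopA (fuel : Nat) (qs : List (String × List String)) (acc : List String) : List String :=
  match fuel with
  | 0 => acc
  | f + 1 =>
    let r := pvRoundA qs
    if r.2.2 then acc else pvLoopA f r.2.1 (acc ++ r.1)

def shuffleURLsFromDomainsQueues (domainQueues : List (String × List String)) : List String :=
  pvLoopA ((domainQueues.map (fun p => p.2.length)).sum + 1) domainQueues []

-- ===== PORT B =====
-- B's inner `for k, url in enumerate(reversed(q))` loop: distribute one queue (already reversed)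
-- into the round buckets; `rounds[k].append(url)` is ported as set-at-k (k < length holds by
-- construction, so getD's default is never used)
def pvFillQ : List (List String) → Nat → List String → List (List String)
  | rounds, _, [] => rounds
  | rounds, k, url :: rest =>
    let rounds1 := if k = rounds.length then rounds ++ [[]] else rounds
    let rounds2 := rounds1.set k (rounds1.getD k [] ++ [url])
    pvFillQ rounds2 (k + 1) rest

def shuffleURLsFromDomainsQueues_alt (domainQueues : List (String × List String)) : List String :=
  let rounds := domainQueues.foldl (fun rs p => pvFillQ rs 0 p.2.reverse) []
  rounds.foldl (fun out r => out ++ r) []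

-- ===== PRECONDITION & SPEC =====
def Spec_shuffleURLsFromDomainsQueues (domainQueues : List (String × List String)) (out : List String) : Prop := out = shuffleURLsFromDomainsQueues_alt domainQueues
instance (domainQueues : List (String × List String)) (out : List String) : Decidable (Spec_shuffleURLsFromDomainsQueues domainQueues out) := by unfold Spec_shuffleURLsFromDomainsQueues; infer_instance

-- ===== CLAIM (what is proved, stated in full; the proofs are below) =====
def Claim_equal_shuffleURLsFromDomainsQueues : Prop := ∀ (domainQueues : List (String × List String)), Dom_shuffleURLsFromDomainsQueues domainQueues → Spec_shuffleURLsFromDomainsQueues domainQueues (shuffleURLsFromDomainsQueues domainQueues)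

-- ===== LEMMAS AND PROOFS =====

-- round k's output: the k-th-from-last URL of every queue that has one, in dict order
def pvColS (i : Nat) (qs : List (String × List String)) : List String :=
  qs.flatMap (fun p => (p.2.reverse[i]?).toList)

-- the number of rounds: the longest queue
def pvMaxlen (qs : List (String × List String)) : Nat :=
  qs.foldr (fun p m => max p.2.length m) 0

-- appending one column to a bucket list, the mathematical shape of pvFillQ
def pvZipE : List (List String) → List String → List (List String)
  | rs, [] => rs
  | [], u :: l => [u] :: pvZipE [] l
  | r :: rs, u :: l => (r ++ [u]) :: pvZipE rs l

theorem pvFillQ_eq_zipE_aux (l : List String) (pre post : List (List String)) :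
    pvFillQ (pre ++ post) pre.length l = pre ++ pvZipE post l := by
  induction l generalizing pre post with
  | nil => cases post <;> simp [pvFillQ, pvZipE]
  | cons u rest ih =>
    cases post with
    | nil =>
      have h1 : ((pre ++ ([] : List (List String))) ++ [[]]) = pre ++ [[]] := by simp
      have hget : (pre ++ [([] : List String)]).getD pre.length [] = [] := by
        simp [List.getD]
      have hset : (pre ++ [([] : List String)]).set pre.length ([] ++ [u]) = pre ++ [[u]] := by
        rw [List.set_append_right _ _ (le_refl _)]
        simp
      have : pvFillQ (pre ++ ([] : List (List String))) pre.length (u :: rest)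
          = pvFillQ (pre ++ [[u]]) (pre.length + 1) rest := by
        simp only [pvFillQ, List.append_nil, if_true, hget, hset]
      rw [this]
      have := ih (pre ++ [[u]]) []
      simp only [List.length_append, List.length_cons, List.length_nil] at this
      simpa [pvZipE, List.append_assoc] using this
    | cons r rs =>
      have hne : pre.length ≠ (pre ++ r :: rs).length := by simp
      have hget : (pre ++ r :: rs).getD pre.length [] = r := by
        simp [List.getD]
      have hset : (pre ++ r :: rs).set pre.length (r ++ [u]) = pre ++ (r ++ [u]) :: rs := by
        rw [List.set_append_right _ _ (le_refl _)]
        simp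
      have : pvFillQ (pre ++ r :: rs) pre.length (u :: rest)
          = pvFillQ ((pre ++ [r ++ [u]]) ++ rs) (pre.length + 1) rest := by
        simp only [pvFillQ, if_neg hne, hget, hset]
        simp [List.append_assoc]
      rw [this]
      have := ih (pre ++ [r ++ [u]]) rs
      simp only [List.length_append, List.length_cons, List.length_nil] at this
      simpa [pvZipE, List.append_assoc] using this

theorem pvFillQ_eq_zipE (l : List String) (rounds : List (List String)) :
    pvFillQ rounds 0 l = pvZipE rounds l := by
  simpa using pvFillQ_eq_zipE_aux l [] rounds

theorem length_pvZipE (l : List String) (rs : List (List String)) :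
    (pvZipE rs l).length = max rs.length l.length := by
  induction l generalizing rs with
  | nil => cases rs <;> simp [pvZipE]
  | cons u rest ih => cases rs <;> simp [pvZipE, ih]

theorem getD_pvZipE (l : List String) (rs : List (List String)) (i : Nat) :
    ((pvZipE rs l)[i]?).getD [] = (rs[i]?).getD [] ++ (l[i]?).toList := by
  induction l generalizing rs i with
  | nil => cases rs <;> simp [pvZipE]
  | cons u rest ih =>
    cases rs with
    | nil => cases i <;> simp [pvZipE, ih]
    | cons r rs' => cases i <;> simp [pvZipE, ih]

theorem pvBfold (qs : List (String × List String)) (rs : List (List String)) :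
    (qs.foldl (fun r p => pvFillQ r 0 p.2.reverse) rs).length = max rs.length (pvMaxlen qs) ∧
    ∀ i, ((qs.foldl (fun r p => pvFillQ r 0 p.2.reverse) rs)[i]?).getD [] = (rs[i]?).getD [] ++ pvColS i qs := by
  induction qs generalizing rs with
  | nil => simp [pvMaxlen, pvColS]
  | cons p rest ih =>
    obtain ⟨ihl, ihg⟩ := ih (pvFillQ rs 0 p.2.reverse)
    constructor
    · rw [List.foldl_cons, ihl, pvFillQ_eq_zipE, length_pvZipE]
      simp [pvMaxlen]
    · intro i
      rw [List.foldl_cons, ihg i, pvFillQ_eq_zipE, getD_pvZipE]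
      simp [pvColS, List.append_assoc]

theorem foldl_append_eq_flatten' (rs : List (List String)) (acc : List String) :
    rs.foldl (fun out r => out ++ r) acc = acc ++ rs.flatten := by
  induction rs generalizing acc with
  | nil => simp
  | cons r rest ih => simp [ih, List.append_assoc]

theorem flatten_eq_range_getD (rs : List (List String)) :
    rs.flatten = (List.range rs.length).flatMap (fun i => (rs[i]?).getD []) := by
  induction rs with
  | nil => simp
  | cons r rest ih =>
    simp only [List.length_cons, List.range_succ_eq_map, List.flatMap_cons, List.flatMap_map]
    simp [ih]

-- ---- A side ----

theorem getElem?_reverse_dropLast (q : List String) (i : Nat) :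
    q.dropLast.reverse[i]? = q.reverse[i + 1]? := by
  induction q using List.reverseRecOn with
  | nil => simp
  | append_singleton xs x _ => simp

theorem pvRoundA_char (qs : List (String × List String)) :
    (pvRoundA qs).1 = pvColS 0 qs ∧
    (pvRoundA qs).2.1 = qs.map (fun p => (p.1, p.2.dropLast)) ∧
    ((pvRoundA qs).2.2 = true ↔ pvMaxlen qs = 0) := by
  induction qs with
  | nil => simp [pvRoundA, pvColS, pvMaxlen]
  | cons p rest ih =>
    obtain ⟨d, q⟩ := p
    obtain ⟨h1, h2, h3⟩ := ih
    have hrev : q.reverse[0]? = q.getLast? := by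
      rw [← List.head?_eq_getElem?, List.head?_reverse]
    rcases hq : q.getLast? with _ | ⟨x⟩
    · have hqe : q = [] := List.getLast?_eq_none_iff.mp hq
      subst hqe
      refine ⟨?_, ?_, ?_⟩
      · simp [pvRoundA, pvColS, h1, pvColS]
      · simp [pvRoundA, h2]
      · simpa [pvRoundA, pvMaxlen] using h3
    · have hqe : q ≠ [] := by intro h; subst h; simp at hq
      refine ⟨?_, ?_, ?_⟩
      · simp [pvRoundA, hq, pvColS, hrev, h1]
      · simp [pvRoundA, hq, h2]
      · have hql : q.length ≠ 0 := by simpa using hqe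
        simp only [pvRoundA, hq, pvMaxlen, List.foldr_cons]
        constructor
        · intro h; cases h
        · intro h; exfalso; omega

theorem pvColS_shift (i : Nat) (qs : List (String × List String)) :
    pvColS i (qs.map (fun p => (p.1, p.2.dropLast))) = pvColS (i + 1) qs := by
  simp [pvColS, List.flatMap_map, getElem?_reverse_dropLast]

theorem pvMaxlen_shift (qs : List (String × List String)) :
    pvMaxlen (qs.map (fun p => (p.1, p.2.dropLast))) = pvMaxlen qs - 1 := by
  induction qs with
  | nil => simp [pvMaxlen]
  | cons p rest ih =>
    simp only [pvMaxlen, List.map_cons, List.foldr_cons] at *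
    rw [ih]
    simp [List.length_dropLast]
    omega

theorem pvLoopA_char (fuel : Nat) (qs : List (String × List String)) (acc : List String)
    (h : pvMaxlen qs < fuel) :
    pvLoopA fuel qs acc = acc ++ (List.range (pvMaxlen qs)).flatMap (fun i => pvColS i qs) := by
  induction fuel generalizing qs acc with
  | zero => omega
  | succ f ih =>
    obtain ⟨h1, h2, h3⟩ := pvRoundA_char qs
    by_cases hz : pvMaxlen qs = 0
    · simp [pvLoopA, h3.mpr hz, hz]
    · have hflag : (pvRoundA qs).2.2 = false := by
        cases hb : (pvRoundA qs).2.2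
        · rfl
        · exact absurd (h3.mp hb) hz
      rw [pvLoopA]
      simp only [hflag, Bool.false_eq_true, if_false, h1, h2]
      rw [ih _ _ (by rw [pvMaxlen_shift]; omega)]
      rw [pvMaxlen_shift]
      obtain ⟨m, hm⟩ : ∃ m, pvMaxlen qs = m + 1 := ⟨pvMaxlen qs - 1, by omega⟩
      rw [hm]
      simp only [Nat.add_sub_cancel, List.range_succ_eq_map, List.flatMap_cons, List.flatMap_map]
      simp [pvColS_shift, List.append_assoc]

theorem pvMaxlen_le_sum (qs : List (String × List String)) :
    pvMaxlen qs ≤ (qs.map (fun p => p.2.length)).sum := by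
  induction qs with
  | nil => simp [pvMaxlen]
  | cons p rest ih =>
    simp only [pvMaxlen, List.foldr_cons, List.map_cons, List.sum_cons] at *
    omega

-- ===== VERDICT (by name: the statement is the Claim_ definition above) =====
theorem shuffleURLsFromDomainsQueues_spec : Claim_equal_shuffleURLsFromDomainsQueues := by
  intro dq _
  show shuffleURLsFromDomainsQueues dq = shuffleURLsFromDomainsQueues_alt dq
  obtain ⟨hl, hg⟩ := pvBfold dq []
  unfold shuffleURLsFromDomainsQueues shuffleURLsFromDomainsQueues_alt
  rw [pvLoopA_char _ _ _ (by have := pvMaxlen_le_sum dq; omega)]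
  rw [foldl_append_eq_flatten', flatten_eq_range_getD, hl]
  simp only [List.length_nil, Nat.zero_max, List.nil_append]
  congr 1
  funext i
  rw [hg i]
  simp
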